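-- pv_equiv track=rewrite | github.com/SeyeonLab/Problem-Solving | Programmers/문제모음/카카오 블라인드 채용 (2018)/비밀지도.py | solution
-- ===== SOURCE A (Python) =====
-- def solution(n, arr1, arr2):
--     answer = []
--
--     for i in range(n):
--         temp = bin(arr1[i] | arr2[i])[2:]  # arr1과 arr2에서 하나라도 #이면 1, 아닌 경우 0
--         temp = temp.rjust(n, '0')  # 길이에 맞춰 0 추가
--         temp = temp.replace('1', '#')
--         temp = temp.replace('0', ' ')
--         answer.append(temp)
--
--     return answer
-- ===== SOURCE B (Python) =====
-- # Pre_ excludes rows with negative entries (where this bit-peeling loop would not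
-- # terminate, while A returns a stray-'b' artefact of bin()) and n beyond the list
-- # lengths (where A raises IndexError).
-- def solution(n, arr1, arr2):
--     answer = []
--     for i in range(n):
--         v = arr1[i] | arr2[i]
--         chars = []
--         while v:
--             chars.append('#' if v & 1 else ' ')
--             v >>= 1
--         chars.reverse()
--         answer.append(''.join(chars).rjust(n, ' '))
--     return answer
-- ===== Notes on version B (the rewrite author's own statement) =====
-- stated objective: alternative
-- what changed: Each row is built by peeling bits with v&1 / v>>=1 into a reversed character list joined and space-padded with rjust, instead of bin()+rjust('0')+two string replaces.
-- outside the precondition, e.g. on solution(1, [-1], [0]): A returns ['b#'], B does not finish within the time limit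
import Mathlib
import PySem

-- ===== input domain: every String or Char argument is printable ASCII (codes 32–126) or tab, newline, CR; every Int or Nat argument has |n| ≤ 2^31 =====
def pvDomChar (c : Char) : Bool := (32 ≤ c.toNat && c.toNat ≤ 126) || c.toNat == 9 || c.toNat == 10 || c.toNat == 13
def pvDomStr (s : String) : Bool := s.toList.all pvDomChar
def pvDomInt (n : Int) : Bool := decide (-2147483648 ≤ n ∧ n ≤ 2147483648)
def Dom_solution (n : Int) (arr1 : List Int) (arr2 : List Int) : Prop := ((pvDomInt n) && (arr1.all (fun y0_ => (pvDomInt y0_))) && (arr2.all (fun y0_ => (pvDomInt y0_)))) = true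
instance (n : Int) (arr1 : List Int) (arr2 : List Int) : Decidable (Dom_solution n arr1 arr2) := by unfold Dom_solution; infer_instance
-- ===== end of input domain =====

-- B builds each row by peeling bits (v&1 / v>>=1, reverse, space-rjust) instead of A's bin()+rjust('0')+two replaces; same cost, different decomposition.


-- ===== PORT A =====
-- s.rjust(w, fill), ported by hand: left-pad with fill up to width w (exact: no pad if len ≥ w or w ≤ 0)
def pyRjust (cs : List Char) (w : Int) (fill : Char) : List Char :=
  List.replicate (w.toNat - cs.length) fill ++ cs

def solution (n : Int) (arr1 : List Int) (arr2 : List Int) : List String :=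
  (PySem.List.pyRange 0 n 1).foldl (fun answer i =>
    -- temp = bin(arr1[i] | arr2[i])[2:]  (indexing total via pyGetD; in range under Pre_)
    let temp := PySem.List.slice
      (PySem.Int.toBinChars0b (PySem.Int.bor (PySem.List.pyGetD arr1 i 0) (PySem.List.pyGetD arr2 i 0)))
      (some 2) none
    let temp := pyRjust temp n '0'
    let temp := PySem.Chars.replace temp ['1'] ['#']
    let temp := PySem.Chars.replace temp ['0'] [' ']
    answer ++ [String.mk temp]) []

-- ===== PORT B =====
-- the while-v loop: collect '#'/' ' from v&1 while halving; LSB first (B reverses at use site).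
-- On Nat: exact for v ≥ 0 (Pre_); Python B does not terminate on negative v.
def bitsB (m : Nat) : List Char :=
  if h : m = 0 then [] else (if m % 2 = 1 then '#' else ' ') :: bitsB (m / 2)
termination_by m
decreasing_by exact Nat.div_lt_self (Nat.pos_of_ne_zero h) one_lt_two

def solution_alt (n : Int) (arr1 : List Int) (arr2 : List Int) : List String :=
  (PySem.List.pyRange 0 n 1).foldl (fun answer i =>
    let v := PySem.Int.bor (PySem.List.pyGetD arr1 i 0) (PySem.List.pyGetD arr2 i 0)
    let chars := (bitsB v.toNat).reverse
    answer ++ [String.mk (pyRjust chars n ' ')]) []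

-- ===== PRECONDITION & SPEC =====
-- Pre_ excludes n beyond the list lengths (A raises IndexError) and negative entries among the
-- first n (A returns a stray-'b' artefact of bin()[2:]; B's while-loop would not terminate there).
def Pre_solution (n : Int) (arr1 : List Int) (arr2 : List Int) : Prop :=
  n ≤ (arr1.length : Int) ∧ n ≤ (arr2.length : Int) ∧
  (∀ x ∈ arr1.take n.toNat, 0 ≤ x) ∧ (∀ x ∈ arr2.take n.toNat, 0 ≤ x)
instance (n : Int) (arr1 : List Int) (arr2 : List Int) : Decidable (Pre_solution n arr1 arr2) := by
  unfold Pre_solution; infer_instance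

def pvWitness_solution : Int × List Int × List Int := (2, ([9, 20], [30, 1]))

def Spec_solution (n : Int) (arr1 : List Int) (arr2 : List Int) (out : List String) : Prop := out = solution_alt n arr1 arr2
instance (n : Int) (arr1 : List Int) (arr2 : List Int) (out : List String) : Decidable (Spec_solution n arr1 arr2 out) := by unfold Spec_solution; infer_instance

-- ===== CLAIM (what is proved, stated in full; the proofs are below) =====
def Claim_equal_solution : Prop := ∀ (n : Int) (arr1 : List Int) (arr2 : List Int), Dom_solution n arr1 arr2 → Pre_solution n arr1 arr2 → Spec_solution n arr1 arr2 (solution n arr1 arr2)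

-- ===== LEMMAS AND PROOFS =====

-- binary digits of m, MSB first, empty for 0 (characterises Nat.toDigits 2)
def binAux (m : Nat) : List Char :=
  if h : m = 0 then [] else binAux (m / 2) ++ [if m % 2 = 1 then '1' else '0']
termination_by m
decreasing_by exact Nat.div_lt_self (Nat.pos_of_ne_zero h) one_lt_two

lemma toDigitsCore_two (f : Nat) : ∀ (m : Nat) (ds : List Char), m < f →
    Nat.toDigitsCore 2 f m ds = (if m = 0 then ['0'] else binAux m) ++ ds := by
  induction f with
  | zero => intro m ds h; omega
  | succ f ih =>
    intro m ds h
    by_cases h0 : m = 0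
    · subst h0; simp [Nat.toDigitsCore, Nat.digitChar]
    · by_cases h1 : m / 2 = 0
      · have hm1 : m = 1 := by omega
        subst hm1
        simp [Nat.toDigitsCore, Nat.digitChar, binAux]
      · have hrec : m / 2 < f := by omega
        rw [show Nat.toDigitsCore 2 (f + 1) m ds
              = Nat.toDigitsCore 2 f (m / 2) (Nat.digitChar (m % 2) :: ds) by
            simp [Nat.toDigitsCore, h1]]
        rw [ih (m / 2) _ hrec, if_neg h1]
        rw [show binAux m = binAux (m / 2) ++ [if m % 2 = 1 then '1' else '0'] by
            rw [binAux]; simp [h0]]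
        rcases Nat.mod_two_eq_zero_or_one m with h2 | h2 <;> simp [h0, h2, Nat.digitChar]

lemma toDigits_two (m : Nat) : Nat.toDigits 2 m = if m = 0 then ['0'] else binAux m := by
  rw [Nat.toDigits, toDigitsCore_two (m + 1) m [] (by omega), List.append_nil]

lemma replace_go_single (a b : Char) : ∀ (fuel : Nat) (l acc : List Char), l.length ≤ fuel →
    PySem.Chars.replace.go [a] [b] fuel l acc
      = acc.reverse ++ l.map (fun c => if c = a then b else c) := by
  intro fuel
  induction fuel with
  | zero =>
    intro l acc h
    have : l = [] := by cases l with | nil => rfl | cons c t => simp at h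
    subst this; simp [PySem.Chars.replace.go]
  | succ fuel ih =>
    intro l acc h
    cases l with
    | nil => simp [PySem.Chars.replace.go]
    | cons c t =>
      by_cases hc : c = a
      · subst hc
        rw [show PySem.Chars.replace.go [c] [b] (fuel + 1) (c :: t) acc
              = PySem.Chars.replace.go [c] [b] fuel (List.drop 1 (c :: t)) ([b].reverse ++ acc) by
            simp [PySem.Chars.replace.go, List.isPrefixOf]]
        simp only [List.drop_one, List.tail_cons, List.reverse_singleton, List.singleton_append]
        rw [ih t (b :: acc) (by simpa using Nat.le_of_succ_le_succ (by simpa using h))]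
        simp
      · rw [show PySem.Chars.replace.go [a] [b] (fuel + 1) (c :: t) acc
              = PySem.Chars.replace.go [a] [b] fuel t (c :: acc) by
            simp [PySem.Chars.replace.go, List.isPrefixOf, Ne.symm hc]]
        rw [ih t (c :: acc) (by simpa using Nat.le_of_succ_le_succ (by simpa using h))]
        simp [hc]

lemma replace_single (s : List Char) (a b : Char) :
    PySem.Chars.replace s [a] [b] = s.map (fun c => if c = a then b else c) := by
  rw [PySem.Chars.replace, if_neg (by simp)]
  simpa using replace_go_single a b s.length s [] (le_refl _)

-- '1'→'#' then '0'→' ' applied to the MSB-first digits of m is exactly B's reversed bit list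
lemma binAux_map (m : Nat) :
    ((binAux m).map (fun c => if c = '1' then '#' else c)).map (fun c => if c = '0' then ' ' else c)
      = (bitsB m).reverse := by
  induction m using Nat.strong_induction_on with
  | _ m ih =>
    by_cases h0 : m = 0
    · subst h0; rw [binAux, bitsB]; simp
    · rw [show binAux m = binAux (m / 2) ++ [if m % 2 = 1 then '1' else '0'] by
          rw [binAux]; simp [h0]]
      rw [show bitsB m = (if m % 2 = 1 then '#' else ' ') :: bitsB (m / 2) by
          rw [bitsB]; simp [h0]]
      have hrec := ih (m / 2) (Nat.div_lt_self (Nat.pos_of_ne_zero h0) one_lt_two)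
      rcases Nat.mod_two_eq_zero_or_one m with h2 | h2 <;>
        simp [h2, hrec]

lemma binAux_length (m : Nat) : (binAux m).length = (bitsB m).length := by
  have := congrArg List.length (binAux_map m)
  simpa using this

-- one row: A's rjust('0') + replaces equals B's reversed bits rjust(' '), for 0 < n
lemma row_eq (m : Nat) (n : Int) (hn : 0 < n) :
    ((pyRjust (if m = 0 then ['0'] else binAux m) n '0').map
        (fun c => if c = '1' then '#' else c)).map (fun c => if c = '0' then ' ' else c)
      = pyRjust (bitsB m).reverse n ' ' := by
  have hn1 : 1 ≤ n.toNat := by omega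
  by_cases h0 : m = 0
  · subst h0
    rw [bitsB]
    simp [pyRjust]
    rw [← List.replicate_succ']
    congr 1
    omega
  · rw [if_neg h0]
    simp only [pyRjust, List.map_append, List.map_replicate]
    rw [binAux_map m]
    simp [binAux_length m]

-- ===== VERDICT (by name: the statement is the Claim_ definition above) =====
theorem solution_spec : Claim_equal_solution := by
  intro n arr1 arr2 _hdom hpre
  obtain ⟨h1, h2, hp1, hp2⟩ := hpre
  unfold Spec_solution solution solution_alt
  rw [PySem.List.foldl_append_singleton_eq_map, PySem.List.foldl_append_singleton_eq_map]
  simp only [List.nil_append]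
  apply List.map_congr_left
  intro i hi
  rw [PySem.List.mem_pyRange_one] at hi
  obtain ⟨hi0, hin⟩ := hi
  have hn : 0 < n := lt_of_le_of_lt hi0 hin
  have hia1 : i < (arr1.length : Int) := lt_of_lt_of_le hin h1
  have hia2 : i < (arr2.length : Int) := lt_of_lt_of_le hin h2
  have hg1 : PySem.List.pyGetD arr1 i 0 = arr1[i.toNat]'(by omega) :=
    PySem.List.pyGetD_eq_getElem arr1 0 hi0 (by simpa using hia1)
  have hg2 : PySem.List.pyGetD arr2 i 0 = arr2[i.toNat]'(by omega) :=
    PySem.List.pyGetD_eq_getElem arr2 0 hi0 (by simpa using hia2)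
  have hx : 0 ≤ arr1[i.toNat]'(by omega) := by
    apply hp1
    have : (arr1.take n.toNat)[i.toNat]'(by simp; omega) = arr1[i.toNat]'(by omega) :=
      List.getElem_take
    exact this ▸ List.getElem_mem _
  have hy : 0 ≤ arr2[i.toNat]'(by omega) := by
    apply hp2
    have : (arr2.take n.toNat)[i.toNat]'(by simp; omega) = arr2[i.toNat]'(by omega) :=
      List.getElem_take
    exact this ▸ List.getElem_mem _
  rw [hg1, hg2, PySem.Int.bor_of_nonneg hx hy]
  set M : Nat := (arr1[i.toNat]'(by omega)).toNat ||| (arr2[i.toNat]'(by omega)).toNat with hM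
  have hslice : PySem.List.slice (PySem.Int.toBinChars0b (M : Int)) (some 2) none
      = Nat.toDigits 2 M := by
    rw [show PySem.Int.toBinChars0b (M : Int) = '0' :: 'b' :: Nat.toDigits 2 M by
      simp [PySem.Int.toBinChars0b, Int.toNat_natCast]]
    rw [show ((2 : Int) = ((2 : Nat) : Int)) from rfl, PySem.List.slice_from_natCast]
    rfl
  simp only [hslice, toDigits_two, Int.toNat_natCast]
  rw [replace_single, replace_single, row_eq M n hn]
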